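-- pv_equiv track=rewrite | github.com/Mateusz-Wojciechowski/keyword-extraction | playground.py | create_phrase_list
-- ===== SOURCE A (Python) =====
-- def create_phrase_list(words, stop_words, punctuation, min_length, max_length):
--     phrases_list = []
--     phrase = []
--     for word in words:
--         if word.lower() in stop_words or word in punctuation:
--             if min_length <= len(phrase) <= max_length:
--                 phrases_list.append(' '.join(phrase))
--             phrase = []
--         else:
--             phrase.append(word)
--     if min_length <= len(phrase) <= max_length:
--         phrases_list.append(' '.join(phrase))
--     return phrases_list
-- ===== SOURCE B (Python) =====
-- def create_phrase_list(words, stop_words, punctuation, min_length, max_length):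
--     # Pass 1: indices of boundary words (stop word or punctuation token).
--     bounds = [i for i, w in enumerate(words)
--               if w.lower() in stop_words or w in punctuation]
--     # Pass 2: reconstruct segments by slicing between consecutive boundaries.
--     segments = []
--     prev = 0
--     for i in bounds:
--         segments.append(words[prev:i])
--         prev = i + 1
--     segments.append(words[prev:])
--     # Pass 3: length-filter and join.
--     return [' '.join(s) for s in segments
--             if min_length <= len(s) <= max_length]
-- ===== Notes on version B (the rewrite author's own statement) =====
-- stated objective: alternative
-- what changed: Replaces A's fused single loop with a mutable phrase accumulator by a three-phase pipeline: collect boundary indices, reconstruct segments by slicing between consecutive boundaries, then filter-and-join in a comprehension.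
import Mathlib
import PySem

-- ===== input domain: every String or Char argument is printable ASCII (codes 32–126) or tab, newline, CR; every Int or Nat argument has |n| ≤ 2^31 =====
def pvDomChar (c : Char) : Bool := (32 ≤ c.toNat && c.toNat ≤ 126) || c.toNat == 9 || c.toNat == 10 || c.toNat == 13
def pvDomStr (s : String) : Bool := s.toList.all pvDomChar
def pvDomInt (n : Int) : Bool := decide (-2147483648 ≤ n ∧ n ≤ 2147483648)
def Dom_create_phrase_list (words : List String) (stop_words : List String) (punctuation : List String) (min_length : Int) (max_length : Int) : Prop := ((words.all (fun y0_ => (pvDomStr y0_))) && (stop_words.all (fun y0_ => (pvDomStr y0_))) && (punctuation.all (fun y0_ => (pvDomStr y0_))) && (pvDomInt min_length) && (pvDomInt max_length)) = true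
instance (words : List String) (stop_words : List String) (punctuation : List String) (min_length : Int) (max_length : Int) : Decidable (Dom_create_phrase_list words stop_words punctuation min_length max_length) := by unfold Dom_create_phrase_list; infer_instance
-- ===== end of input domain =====

-- B replaces A's fused single loop (mutable current-phrase accumulator, flush at each boundary)
-- by a three-phase pipeline: boundary indices, slicing between consecutive boundaries, then a
-- filter-and-join comprehension; an alternative decomposition of the same cost.

-- ===== PORT A =====
def create_phrase_list (words : List String) (stop_words : List String) (punctuation : List String) (min_length : Int) (max_length : Int) : List String :=
  let st := words.foldl
    (fun (st : List String × List String) word =>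
      if stop_words.contains (PySem.Str.lower word) || punctuation.contains word then
        ((if min_length ≤ (st.2.length : Int) ∧ (st.2.length : Int) ≤ max_length then
            st.1 ++ [PySem.Str.join " " st.2]
          else st.1), [])
      else (st.1, st.2 ++ [word]))
    ([], [])
  if min_length ≤ (st.2.length : Int) ∧ (st.2.length : Int) ≤ max_length then
    st.1 ++ [PySem.Str.join " " st.2]
  else st.1

-- ===== PORT B =====
def create_phrase_list_alt (words : List String) (stop_words : List String) (punctuation : List String) (min_length : Int) (max_length : Int) : List String :=
  let bounds := (PySem.List.enumerate words).filterMap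
    (fun p => if stop_words.contains (PySem.Str.lower p.2) || punctuation.contains p.2 then some p.1 else none)
  let st := bounds.foldl
    (fun (st : List (List String) × Int) i =>
      (st.1 ++ [PySem.List.slice words (some st.2) (some i)], i + 1))
    ([], 0)
  let segments := st.1 ++ [PySem.List.slice words (some st.2) none]
  (segments.filter (fun s => decide (min_length ≤ (s.length : Int) ∧ (s.length : Int) ≤ max_length))).map
    (fun s => PySem.Str.join " " s)

-- ===== PRECONDITION & SPEC =====
def Spec_create_phrase_list (words : List String) (stop_words : List String) (punctuation : List String) (min_length : Int) (max_length : Int) (out : List String) : Prop := out = create_phrase_list_alt words stop_words punctuation min_length max_length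
instance (words : List String) (stop_words : List String) (punctuation : List String) (min_length : Int) (max_length : Int) (out : List String) : Decidable (Spec_create_phrase_list words stop_words punctuation min_length max_length out) := by unfold Spec_create_phrase_list; infer_instance

-- ===== CLAIM (what is proved, stated in full; the proofs are below) =====
def Claim_equal_create_phrase_list : Prop := ∀ (words : List String) (stop_words : List String) (punctuation : List String) (min_length : Int) (max_length : Int), Dom_create_phrase_list words stop_words punctuation min_length max_length → Spec_create_phrase_list words stop_words punctuation min_length max_length (create_phrase_list words stop_words punctuation min_length max_length)

-- ===== LEMMAS AND PROOFS =====

-- the boundary predicate shared by both proofs (a word that ends the current phrase)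
def cplB (stop_words punctuation : List String) (w : String) : Bool :=
  stop_words.contains (PySem.Str.lower w) || punctuation.contains w

-- the segmentation both programs compute, as a structural recursion
def segsRec (b : String → Bool) : List String → List (List String)
  | [] => [[]]
  | w :: ws =>
    if b w then [] :: segsRec b ws
    else
      match segsRec b ws with
      | [] => [[w]]
      | s :: t => (w :: s) :: t

-- prepend a prefix onto the first segment
def consFirst (p : List String) : List (List String) → List (List String)
  | [] => [p]
  | s :: t => (p ++ s) :: t

-- filter-and-join of a segment list
def cplOut (mn mx : Int) (X : List (List String)) : List String :=
  (X.filter (fun s => decide (mn ≤ (s.length : Int) ∧ (s.length : Int) ≤ mx))).map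
    (fun s => PySem.Str.join " " s)

theorem segsRec_ne_nil (b : String → Bool) (ws : List String) : segsRec b ws ≠ [] := by
  cases ws with
  | nil => simp [segsRec]
  | cons w ws =>
    simp only [segsRec]
    split
    · simp
    · cases h : segsRec b ws <;> simp

theorem consFirst_nil (X : List (List String)) (h : X ≠ []) : consFirst [] X = X := by
  cases X with
  | nil => exact absurd rfl h
  | cons s t => simp [consFirst]

theorem cplOut_cons (mn mx : Int) (s : List String) (X : List (List String)) :
    cplOut mn mx (s :: X) =
      (if mn ≤ (s.length : Int) ∧ (s.length : Int) ≤ mx then [PySem.Str.join " " s] else []) ++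
        cplOut mn mx X := by
  simp only [cplOut, List.filter_cons]
  split_ifs with h <;> simp_all

-- A's loop, with arbitrary accumulated output and current phrase, computes
-- the filter-and-join of the remaining segmentation with the phrase glued onto its first segment.
theorem A_loop (sw pu : List String) (mn mx : Int) :
    ∀ (ws acc phrase : List String),
      (let st := ws.foldl
          (fun (st : List String × List String) word =>
            if sw.contains (PySem.Str.lower word) || pu.contains word then
              ((if mn ≤ (st.2.length : Int) ∧ (st.2.length : Int) ≤ mx then
                  st.1 ++ [PySem.Str.join " " st.2]
                else st.1), [])
            else (st.1, st.2 ++ [word]))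
          (acc, phrase)
       if mn ≤ (st.2.length : Int) ∧ (st.2.length : Int) ≤ mx then
         st.1 ++ [PySem.Str.join " " st.2]
       else st.1)
      = acc ++ cplOut mn mx (consFirst phrase (segsRec (cplB sw pu) ws)) := by
  intro ws
  induction ws with
  | nil =>
    intro acc phrase
    simp only [List.foldl_nil]
    have h1 : consFirst phrase (segsRec (cplB sw pu) []) = [phrase] := by
      simp [segsRec, consFirst]
    rw [h1, cplOut_cons]
    have h2 : cplOut mn mx [] = [] := by simp [cplOut]
    rw [h2]
    split_ifs with h <;> simp
  | cons w ws ih =>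
    intro acc phrase
    simp only [List.foldl_cons]
    by_cases hb : cplB sw pu w = true
    · have hb' : (sw.contains (PySem.Str.lower w) || pu.contains w) = true := hb
      simp only [hb', if_true]
      rw [ih]
      have hseg : segsRec (cplB sw pu) (w :: ws) = [] :: segsRec (cplB sw pu) ws := by
        simp [segsRec, hb]
      rw [hseg, consFirst_nil _ (segsRec_ne_nil _ _)]
      have : consFirst phrase ([] :: segsRec (cplB sw pu) ws) =
          phrase :: segsRec (cplB sw pu) ws := by simp [consFirst]
      rw [this, cplOut_cons]
      split_ifs with h <;> simp
    · have hb' : (sw.contains (PySem.Str.lower w) || pu.contains w) = false := by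
        simpa [cplB] using hb
      simp only [hb', Bool.false_eq_true, if_false]
      rw [ih]
      have hseg : consFirst phrase (segsRec (cplB sw pu) (w :: ws)) =
          consFirst (phrase ++ [w]) (segsRec (cplB sw pu) ws) := by
        simp only [segsRec, hb, Bool.false_eq_true, if_false]
        cases h : segsRec (cplB sw pu) ws <;> simp [consFirst]
      rw [hseg]

-- B's slicing loop over the boundary indices of the suffix ws (absolute start index pre.length,
-- current segment start prev inside the prefix) rebuilds the same segmentation.
theorem B_seg (sw pu : List String) :
    ∀ (ws pre : List String) (prev : Nat) (acc : List (List String)),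
      prev ≤ pre.length →
      (let st := ((PySem.List.enumerate ws (pre.length : Int)).filterMap
            (fun p => if sw.contains (PySem.Str.lower p.2) || pu.contains p.2 then some p.1 else none)).foldl
          (fun (st : List (List String) × Int) i =>
            (st.1 ++ [PySem.List.slice (pre ++ ws) (some st.2) (some i)], i + 1))
          (acc, (prev : Int))
       st.1 ++ [PySem.List.slice (pre ++ ws) (some st.2) none])
      = acc ++ consFirst (pre.drop prev) (segsRec (cplB sw pu) ws) := by
  intro ws
  induction ws with
  | nil =>
    intro pre prev acc hprev
    simp [PySem.List.enumerate, segsRec, consFirst, PySem.List.slice_from_natCast]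
  | cons w ws ih =>
    intro pre prev acc hprev
    have hfull : pre ++ w :: ws = (pre ++ [w]) ++ ws := by simp
    have hlen : (((pre ++ [w]).length : Nat) : Int) = (pre.length : Int) + 1 := by
      push_cast [List.length_append, List.length_singleton]; ring
    rw [PySem.List.enumerate_cons]
    by_cases hb : cplB sw pu w = true
    · have hb' : (sw.contains (PySem.Str.lower w) || pu.contains w) = true := hb
      simp only [List.filterMap_cons, hb', if_true, List.foldl_cons]
      have hslice : PySem.List.slice (pre ++ w :: ws) (some (prev : Int)) (some (pre.length : Int))
          = pre.drop prev := by
        rw [PySem.List.slice_natCast, List.drop_append_of_le_length hprev]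
        rw [show pre.length - prev = (List.drop prev pre).length by simp]
        simp
      rw [hslice]
      rw [show ((pre.length : Int) + 1) = (((pre ++ [w]).length : Nat) : Int) from hlen.symm, hfull]
      rw [ih (pre ++ [w]) (pre ++ [w]).length (acc ++ [pre.drop prev]) (le_refl _)]
      have hdrop : (pre ++ [w]).drop (pre ++ [w]).length = [] := by simp
      rw [hdrop, consFirst_nil _ (segsRec_ne_nil _ _)]
      have hseg : segsRec (cplB sw pu) (w :: ws) = [] :: segsRec (cplB sw pu) ws := by
        simp [segsRec, hb]
      rw [hseg]
      simp [consFirst]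
    · have hb' : (sw.contains (PySem.Str.lower w) || pu.contains w) = false := by
        simpa [cplB] using hb
      simp only [List.filterMap_cons, hb', Bool.false_eq_true, if_false]
      rw [hfull]
      rw [show ((pre.length : Int) + 1) = (((pre ++ [w]).length : Nat) : Int) from hlen.symm]
      rw [ih (pre ++ [w]) prev acc (by simp only [List.length_append, List.length_cons, List.length_nil]; omega)]
      have hdrop : (pre ++ [w]).drop prev = pre.drop prev ++ [w] := by
        rw [List.drop_append_of_le_length hprev]
      rw [hdrop]
      have hseg : consFirst (pre.drop prev) (segsRec (cplB sw pu) (w :: ws)) =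
          consFirst (pre.drop prev ++ [w]) (segsRec (cplB sw pu) ws) := by
        simp only [segsRec, hb, Bool.false_eq_true, if_false]
        cases h : segsRec (cplB sw pu) ws <;> simp [consFirst]
      rw [hseg]

-- B's segment construction, named for the final rewrite (definitionally B's middle phase)
def segB (words sw pu : List String) : List (List String) :=
  let st := ((PySem.List.enumerate words 0).filterMap
      (fun p => if sw.contains (PySem.Str.lower p.2) || pu.contains p.2 then some p.1 else none)).foldl
    (fun (st : List (List String) × Int) i =>
      (st.1 ++ [PySem.List.slice words (some st.2) (some i)], i + 1))
    ([], 0)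
  st.1 ++ [PySem.List.slice words (some st.2) none]

theorem alt_eq (words sw pu : List String) (mn mx : Int) :
    create_phrase_list_alt words sw pu mn mx = cplOut mn mx (segB words sw pu) := rfl

theorem segB_eq (words sw pu : List String) :
    segB words sw pu = segsRec (cplB sw pu) words := by
  have hB := B_seg sw pu words [] 0 [] (by simp)
  simp only [List.nil_append, List.drop_nil] at hB
  rw [consFirst_nil _ (segsRec_ne_nil _ _)] at hB
  exact hB

-- ===== VERDICT (by name: the statement is the Claim_ definition above) =====
theorem create_phrase_list_spec : Claim_equal_create_phrase_list := by
  unfold Claim_equal_create_phrase_list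
  intro words sw pu mn mx _
  unfold Spec_create_phrase_list
  unfold create_phrase_list
  rw [A_loop sw pu mn mx words [] [], alt_eq, segB_eq]
  have h1 : consFirst [] (segsRec (cplB sw pu) words) = segsRec (cplB sw pu) words :=
    consFirst_nil _ (segsRec_ne_nil _ _)
  rw [h1, List.nil_append]
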